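-- pv_equiv track=rewrite | github.com/Jignesh6775/Learning_Python | Set-2.py | arrange_lowercase_first
-- ===== SOURCE A (Python) =====
-- def arrange_lowercase_first(input_str):
--     lowercase_chars = ""
--     uppercase_chars = ""
--
--     for char in input_str:
--         if char.islower():
--             lowercase_chars += char
--         else:
--             uppercase_chars += char
--
--     arranged_str = lowercase_chars + uppercase_chars
--     return arranged_str
-- ===== SOURCE B (Python) =====
-- def arrange_lowercase_first(input_str):
--     return ''.join(sorted(input_str, key=lambda c: not c.islower()))
-- ===== Notes on version B (the rewrite author's own statement) =====
-- stated objective: idiomatic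
-- what changed: Replaces the explicit loop with two string accumulators by a single stable sort keyed on whether each character is not lowercase, relying on Timsort stability to keep relative order within each group.
import Mathlib
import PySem

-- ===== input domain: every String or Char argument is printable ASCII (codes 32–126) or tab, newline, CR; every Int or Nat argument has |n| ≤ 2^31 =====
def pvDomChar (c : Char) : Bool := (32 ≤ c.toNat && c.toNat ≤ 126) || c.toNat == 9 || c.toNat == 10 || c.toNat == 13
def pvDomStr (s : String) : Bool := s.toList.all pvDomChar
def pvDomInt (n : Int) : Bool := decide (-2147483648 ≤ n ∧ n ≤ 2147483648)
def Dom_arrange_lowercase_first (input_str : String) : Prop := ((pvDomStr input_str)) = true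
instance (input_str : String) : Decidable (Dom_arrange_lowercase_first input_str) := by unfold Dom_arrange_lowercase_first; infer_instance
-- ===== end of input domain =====

-- B replaces A's two-accumulator loop by one stable sort on the key 'not c.islower()' (idiomatic; same result).

-- ===== PORT A =====
-- A's loop over the characters with two string accumulators; strings kept as List Char per convention.
def arrange_lowercase_first (input_str : String) : String :=
  let p := input_str.toList.foldl
    (fun (acc : List Char × List Char) c =>
      if PySem.Chars.islower c then (acc.1 ++ [c], acc.2) else (acc.1, acc.2 ++ [c]))
    ([], [])
  String.ofList (p.1 ++ p.2)

-- ===== PORT B =====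
-- ''.join(sorted(input_str, key=lambda c: not c.islower()))
def arrange_lowercase_first_alt (input_str : String) : String :=
  String.ofList (PySem.List.sorted input_str.toList (fun c => !PySem.Chars.islower c) false)

-- ===== PRECONDITION & SPEC =====
def Spec_arrange_lowercase_first (input_str : String) (out : String) : Prop := out = arrange_lowercase_first_alt input_str
instance (input_str : String) (out : String) : Decidable (Spec_arrange_lowercase_first input_str out) := by unfold Spec_arrange_lowercase_first; infer_instance

-- ===== CLAIM (what is proved, stated in full; the proofs are below) =====
def Claim_equal_arrange_lowercase_first : Prop := ∀ (input_str : String), Dom_arrange_lowercase_first input_str → Spec_arrange_lowercase_first input_str (arrange_lowercase_first input_str)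

-- ===== LEMMAS AND PROOFS =====

-- Inserting an element whose key is true after a false-block A and a true-block B appends it at the end.
theorem insertBy_true {key : Char → Bool} {x : Char} (A B : List Char)
    (hA : ∀ y ∈ A, key y = false) (hB : ∀ y ∈ B, key y = true) (hx : key x = true) :
    PySem.List.insertBy (fun a b => decide (key a < key b)) x (A ++ B) = A ++ B ++ [x] := by
  induction A with
  | nil =>
    induction B with
    | nil => simp [PySem.List.insertBy]
    | cons b bs ih =>
      have hb := hB b (by simp)
      have hrec := ih (fun y hy => hB y (List.mem_cons_of_mem _ hy))
      simp only [List.nil_append] at hrec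
      simp [PySem.List.insertBy, hx, hb, hrec]
  | cons a as ih =>
    have ha := hA a (by simp)
    have hrec := ih (fun y hy => hA y (List.mem_cons_of_mem _ hy))
    simp [PySem.List.insertBy, hx, ha, hrec]

-- Inserting an element whose key is false goes right between the false-block and the true-block.
theorem insertBy_false {key : Char → Bool} {x : Char} (A B : List Char)
    (hA : ∀ y ∈ A, key y = false) (hB : ∀ y ∈ B, key y = true) (hx : key x = false) :
    PySem.List.insertBy (fun a b => decide (key a < key b)) x (A ++ B) = A ++ x :: B := by
  induction A with
  | nil =>
    cases B with
    | nil => simp [PySem.List.insertBy]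
    | cons b bs =>
      have hb := hB b (by simp)
      simp [PySem.List.insertBy, Bool.lt_iff, hx, hb]
  | cons a as ih =>
    have ha := hA a (by simp)
    have hrec := ih (fun y hy => hA y (List.mem_cons_of_mem _ hy))
    simp [PySem.List.insertBy, hx, ha, hrec]

-- The insertion-sort fold on a boolean key is a stable partition.
theorem sortedFold_partition {key : Char → Bool} (xs A B : List Char)
    (hA : ∀ y ∈ A, key y = false) (hB : ∀ y ∈ B, key y = true) :
    xs.foldl (fun acc x => PySem.List.insertBy (fun a b => decide (key a < key b)) x acc) (A ++ B)
      = (A ++ xs.filter (fun c => key c = false)) ++ (B ++ xs.filter (fun c => key c = true)) := by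
  induction xs generalizing A B with
  | nil => simp
  | cons x xs ih =>
    by_cases hx : key x = true
    · have hB' : ∀ y ∈ B ++ [x], key y = true := by
        intro y hy
        rcases List.mem_append.1 hy with h | h
        · exact hB y h
        · simp at h; rw [h, hx]
      rw [List.foldl_cons, insertBy_true A B hA hB hx, List.append_assoc,
        ih A (B ++ [x]) hA hB']
      simp [hx]
    · have hx' : key x = false := by simpa using hx
      have hA' : ∀ y ∈ A ++ [x], key y = false := by
        intro y hy
        rcases List.mem_append.1 hy with h | h
        · exact hA y h
        · simp at h; rw [h, hx']
      rw [List.foldl_cons, insertBy_false A B hA hB hx',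
        show A ++ x :: B = (A ++ [x]) ++ B by simp,
        ih (A ++ [x]) B hA' hB]
      simp [hx']

-- A's two-accumulator fold is the same partition.
theorem aFold_partition (xs l u : List Char) :
    xs.foldl (fun (acc : List Char × List Char) c =>
        if PySem.Chars.islower c then (acc.1 ++ [c], acc.2) else (acc.1, acc.2 ++ [c])) (l, u)
      = (l ++ xs.filter (fun c => PySem.Chars.islower c), u ++ xs.filter (fun c => !PySem.Chars.islower c)) := by
  induction xs generalizing l u with
  | nil => simp
  | cons x xs ih =>
    by_cases hx : PySem.Chars.islower x
    · simp [List.foldl_cons, hx, ih]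
    · simp [List.foldl_cons, hx, ih]

-- ===== VERDICT (by name: the statement is the Claim_ definition above) =====
theorem arrange_lowercase_first_spec : Claim_equal_arrange_lowercase_first := by
  intro s _
  show _ = _
  unfold arrange_lowercase_first arrange_lowercase_first_alt PySem.List.sorted
  simp only [aFold_partition s.toList [] []]
  have := sortedFold_partition (key := fun c => !PySem.Chars.islower c) s.toList [] []
    (by intro y h; simp at h) (by intro y h; simp at h)
  simp only [List.nil_append, List.append_nil, if_neg (by decide : ¬ false = true)] at this ⊢
  rw [this]
  congr 1
  simp
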